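-- pv_equiv track=rewrite | github.com/SimonGleyze/MOOC-Python | Weeks 3-4.py | nfruits
-- ===== SOURCE A (Python) =====
-- def nfruits(dict, meal):
--     for i in meal[0:-1]:
--         for j in dict:
--             if i == j:
--                 dict[j] -= 1
--             else:
--                 dict[j] += 1
--     for i in meal[-1]:
--         for j in dict:
--             if i == j:
--                 dict[j] -= 1
--     result = max(dict, key=dict.get)
--     return dict[str(result)]
-- ===== SOURCE B (Python) =====
-- def nfruits(dict, meal):
--     last = meal[-1]
--     bump = len(meal) - 1
--     prefix = {}
--     for s in meal[:-1]:
--         prefix[s] = prefix.get(s, 0) + 1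
--     lastc = {}
--     for c in last:
--         lastc[c] = lastc.get(c, 0) + 1
--     for j in dict:
--         dict[j] += bump - 2 * prefix.get(j, 0) - lastc.get(j, 0)
--     result = max(dict, key=dict.get)
--     return dict[result]
-- ===== Notes on version B (the rewrite author's own statement) =====
-- stated objective: faster
-- what changed: Replaces the nested per-meal-item/per-key increment-decrement loops by two count tables (one over meal[:-1], one over the characters of meal[-1]) plus a single pass over the dict that adds len(meal)-1 - 2*prefix_count - last_char_count to each key, keeping the in-place mutation and the identical max tie-breaking tail.
import Mathlib
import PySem

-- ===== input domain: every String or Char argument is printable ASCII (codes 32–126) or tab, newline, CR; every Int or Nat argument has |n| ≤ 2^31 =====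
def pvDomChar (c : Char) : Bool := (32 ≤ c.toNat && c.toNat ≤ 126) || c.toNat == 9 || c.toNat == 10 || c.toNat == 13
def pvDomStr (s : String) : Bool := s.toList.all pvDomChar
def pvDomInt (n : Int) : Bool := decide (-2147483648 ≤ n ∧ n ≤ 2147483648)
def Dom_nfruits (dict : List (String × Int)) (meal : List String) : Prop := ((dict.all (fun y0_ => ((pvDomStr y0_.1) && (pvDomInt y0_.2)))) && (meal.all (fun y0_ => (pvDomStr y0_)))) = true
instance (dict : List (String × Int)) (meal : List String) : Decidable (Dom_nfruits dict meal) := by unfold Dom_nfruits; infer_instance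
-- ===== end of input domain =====

-- B replaces the nested increment/decrement loops by two count tables plus one pass over the
-- dict keys (asymptotically faster); both A and B mutate the Python dict in place identically,
-- the equivalence proved here is about the return value.


-- ===== PORT A =====
def nfruits (dict : List (String × Int)) (meal : List String) : Int :=
  let d0 : PySem.Dict String Int := PySem.Dict.mk dict
  -- for i in meal[0:-1]: for j in dict: dict[j] -= 1 / dict[j] += 1
  let d1 := (PySem.List.slice meal (some 0) (some (-1))).foldl
      (fun d i => d.keys.foldl
        (fun d j => if i == j then d.modify j 0 (fun v => v - 1) else d.modify j 0 (fun v => v + 1)) d) d0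
  -- for i in meal[-1]: for j in dict: if i == j: dict[j] -= 1   (i is a one-char string)
  let d2 := match PySem.List.pyGet? meal (-1) with
    | none => d1   -- IndexError on empty meal; excluded by Pre_
    | some last => (last.toList.map (fun c => String.ofList [c])).foldl
        (fun d i => d.keys.foldl
          (fun d j => if i == j then d.modify j 0 (fun v => v - 1) else d) d) d1
  -- result = max(dict, key=dict.get); return dict[str(result)]
  match PySem.List.max? d2.keys (fun k => d2.getD k 0) with
  | none => 0    -- ValueError on empty dict; excluded by Pre_
  | some result => d2.getD result 0

-- ===== PORT B =====
def nfruits_alt (dict : List (String × Int)) (meal : List String) : Int :=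
  match PySem.List.pyGet? meal (-1) with
  | none => 0    -- IndexError on empty meal; excluded by Pre_
  | some last =>
    let bump : Int := (meal.length : Int) - 1
    -- prefix = {}; for s in meal[:-1]: prefix[s] = prefix.get(s, 0) + 1
    let prefixC := (PySem.List.slice meal (some 0) (some (-1))).foldl
        (fun d s => d.insert s (d.getD s 0 + 1)) (PySem.Dict.empty : PySem.Dict String Int)
    -- lastc = {}; for c in last: lastc[c] = lastc.get(c, 0) + 1   (c is a one-char string)
    let lastc := (last.toList.map (fun c => String.ofList [c])).foldl
        (fun d c => d.insert c (d.getD c 0 + 1)) (PySem.Dict.empty : PySem.Dict String Int)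
    -- for j in dict: dict[j] += bump - 2 * prefix.get(j, 0) - lastc.get(j, 0)
    let d : PySem.Dict String Int := PySem.Dict.mk dict
    let d2 := d.keys.foldl
        (fun acc j => acc.modify j 0 (fun v => v + bump - 2 * prefixC.getD j 0 - lastc.getD j 0)) d
    -- result = max(dict, key=dict.get); return dict[result]
    match PySem.List.max? d2.keys (fun k => d2.getD k 0) with
    | none => 0
    | some result => d2.getD result 0

-- ===== PRECONDITION & SPEC =====
-- A raises IndexError on meal = [] and ValueError (max of empty) on dict = []; B raises there too.
-- Nodup keys only excludes association lists that no Python dict can denote (dicts cannot repeat keys).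
def Pre_nfruits (dict : List (String × Int)) (meal : List String) : Prop :=
  meal ≠ [] ∧ dict ≠ [] ∧ (dict.map Prod.fst).Nodup
instance (dict : List (String × Int)) (meal : List String) : Decidable (Pre_nfruits dict meal) := by
  unfold Pre_nfruits; infer_instance
def pvWitness_nfruits : (List (String × Int)) × List String := ([("apple", 2), ("b", 0)], ["b", "apple"])

def Spec_nfruits (dict : List (String × Int)) (meal : List String) (out : Int) : Prop := out = nfruits_alt dict meal
instance (dict : List (String × Int)) (meal : List String) (out : Int) : Decidable (Spec_nfruits dict meal out) := by unfold Spec_nfruits; infer_instance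

-- ===== CLAIM (what is proved, stated in full; the proofs are below) =====
def Claim_equal_nfruits : Prop := ∀ (dict : List (String × Int)) (meal : List String), Dom_nfruits dict meal → Pre_nfruits dict meal → Spec_nfruits dict meal (nfruits dict meal)

-- ===== LEMMAS AND PROOFS =====

-- value after a pass of per-key modifies over a Nodup list of keys
theorem pv_getD_foldl_modify_fun (f : String → Int → Int) (L : List String) (hL : L.Nodup)
    (d : PySem.Dict String Int) (k : String) :
    (L.foldl (fun d j => d.modify j 0 (f j)) d).getD k 0
      = if k ∈ L then f k (d.getD k 0) else d.getD k 0 := by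
  induction L generalizing d with
  | nil => simp
  | cons j t ih =>
    simp only [List.foldl_cons]
    rw [ih (by exact hL.of_cons)]
    rcases List.nodup_cons.mp hL with ⟨hj, _⟩
    by_cases hk : k = j
    · subst hk
      simp [hj]
    · simp [PySem.Dict.getD_modify, hk, List.mem_cons]

-- value after A's last-meal pass (modify only on a match, otherwise skip)
theorem pv_getD_foldl_modify_if (i : String) (L : List String) (hL : L.Nodup)
    (d : PySem.Dict String Int) (k : String) :
    (L.foldl (fun d j => if i == j then d.modify j 0 (fun v => v - 1) else d) d).getD k 0
      = if k ∈ L ∧ i = k then d.getD k 0 - 1 else d.getD k 0 := by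
  induction L generalizing d with
  | nil => simp
  | cons j t ih =>
    simp only [List.foldl_cons]
    rw [ih (by exact hL.of_cons)]
    rcases List.nodup_cons.mp hL with ⟨hj, _⟩
    by_cases hij : i = j
    · subst hij
      by_cases hk : k = i
      · subst hk
        simp [hj]
      · simp [PySem.Dict.getD_modify, List.mem_cons, fun h : k = i => hk h]
    · have : (i == j) = false := by simp [hij]
      simp only [this, Bool.false_eq_true, if_false]
      by_cases hk : k = j
      · subst hk
        simp [hj, fun h : i = k => hij h]
      · simp [List.mem_cons, hk]

-- keys are preserved by any fold whose step keeps the keys of dicts containing the visited key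
theorem pv_keys_foldl_pres (L : List String) (step : PySem.Dict String Int → String → PySem.Dict String Int)
    (hstep : ∀ d j, j ∈ PySem.Dict.keys d → (step d j).keys = d.keys)
    (d : PySem.Dict String Int) (hL : ∀ j ∈ L, j ∈ d.keys) :
    (L.foldl step d).keys = d.keys := by
  induction L generalizing d with
  | nil => rfl
  | cons j t ih =>
    have h1 : (step d j).keys = d.keys := hstep d j (hL j (by simp))
    simp only [List.foldl_cons]
    rw [ih (step d j) (fun x hx => h1 ▸ hL x (by simp [hx]))]
    exact h1

theorem pv_keys_modify_mem (d : PySem.Dict String Int) (j : String) (f : Int → Int)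
    (hj : j ∈ PySem.Dict.keys d) : (d.modify j 0 f).keys = d.keys := by
  rw [PySem.Dict.keys_modify]
  exact PySem.Dict.keys_insert_of_contains d _ ((PySem.Dict.contains_iff_mem_keys d j).mpr hj)

-- A's inner step over d.keys, rewritten as a single per-key modify
theorem pv_innerA_eq (i : String) (d : PySem.Dict String Int) :
    (PySem.Dict.keys d).foldl
        (fun d j => if i == j then d.modify j 0 (fun v => v - 1) else d.modify j 0 (fun v => v + 1)) d
      = (PySem.Dict.keys d).foldl
        (fun d j => d.modify j 0 (fun v => if i == j then v - 1 else v + 1)) d := by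
  apply List.foldl_ext
  intro d j _
  by_cases h : i = j <;> simp [h]

-- A's prefix loop: each key k gains |P| - 2 * count of k in P; keys and Nodup are preserved
theorem pv_outerA (P : List String) (d : PySem.Dict String Int) (hnd : (PySem.Dict.keys d).Nodup) :
    (P.foldl (fun d i => (PySem.Dict.keys d).foldl
        (fun d j => if i == j then d.modify j 0 (fun v => v - 1) else d.modify j 0 (fun v => v + 1)) d) d).keys
      = d.keys ∧
    ∀ k ∈ PySem.Dict.keys d,
      (P.foldl (fun d i => (PySem.Dict.keys d).foldl
        (fun d j => if i == j then d.modify j 0 (fun v => v - 1) else d.modify j 0 (fun v => v + 1)) d) d).getD k 0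
      = d.getD k 0 + P.length - 2 * P.count k := by
  induction P generalizing d with
  | nil => exact ⟨rfl, by intro k _; simp⟩
  | cons i t ih =>
    have hkeys1 : ((PySem.Dict.keys d).foldl
        (fun d j => if i == j then d.modify j 0 (fun v => v - 1) else d.modify j 0 (fun v => v + 1)) d).keys = d.keys := by
      rw [pv_innerA_eq]
      exact pv_keys_foldl_pres _ _ (fun d j hj => pv_keys_modify_mem d j _ hj) d (fun j hj => hj)
    obtain ⟨ihk, ihv⟩ := ih _ (by rw [hkeys1]; exact hnd)
    constructor
    · simp only [List.foldl_cons]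
      rw [ihk, hkeys1]
    · intro k hk
      simp only [List.foldl_cons]
      rw [ihv k (by rw [hkeys1]; exact hk)]
      rw [pv_innerA_eq, pv_getD_foldl_modify_fun _ _ hnd]
      simp only [hk, if_pos]
      by_cases h : i = k
      · subst h
        simp
        ring
      · have : (i == k) = false := by simp [h]
        simp [this, h]
        ring

-- A's last-string loop: each key k loses the number of its occurrences in LC
theorem pv_outerL (LC : List String) (d : PySem.Dict String Int) (hnd : (PySem.Dict.keys d).Nodup) :
    (LC.foldl (fun d i => (PySem.Dict.keys d).foldl
        (fun d j => if i == j then d.modify j 0 (fun v => v - 1) else d) d) d).keys = d.keys ∧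
    ∀ k ∈ PySem.Dict.keys d,
      (LC.foldl (fun d i => (PySem.Dict.keys d).foldl
        (fun d j => if i == j then d.modify j 0 (fun v => v - 1) else d) d) d).getD k 0
      = d.getD k 0 - LC.count k := by
  induction LC generalizing d with
  | nil => exact ⟨rfl, by intro k _; simp⟩
  | cons i t ih =>
    have hkeys1 : ((PySem.Dict.keys d).foldl
        (fun d j => if i == j then d.modify j 0 (fun v => v - 1) else d) d).keys = d.keys := by
      refine pv_keys_foldl_pres _ _ ?_ d (fun j hj => hj)
      intro d j hj
      by_cases h : i = j <;> simp [h, pv_keys_modify_mem d j _ hj]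
    obtain ⟨ihk, ihv⟩ := ih _ (by rw [hkeys1]; exact hnd)
    constructor
    · simp only [List.foldl_cons]
      rw [ihk, hkeys1]
    · intro k hk
      simp only [List.foldl_cons]
      rw [ihv k (by rw [hkeys1]; exact hk)]
      rw [pv_getD_foldl_modify_if _ _ hnd]
      by_cases h : i = k
      · subst h
        simp [hk]
        ring
      · have hc : ¬ (k ∈ PySem.Dict.keys d ∧ i = k) := fun hc => h hc.2
        rw [if_neg hc]
        have hbe : (k == i) = false := beq_eq_false_iff_ne.mpr (fun hh => h hh.symm)
        simp [h]

-- the two final dicts are equal under Pre_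
theorem pv_dicts_eq (dict : List (String × Int)) (meal : List String) (last : String)
    (hlast : PySem.List.pyGet? meal (-1) = some last)
    (hm : meal ≠ []) (hnd : (dict.map Prod.fst).Nodup) :
    ((last.toList.map (fun c => String.ofList [c])).foldl
        (fun d i => (PySem.Dict.keys d).foldl
          (fun d j => if i == j then d.modify j 0 (fun v => v - 1) else d) d)
        ((PySem.List.slice meal (some 0) (some (-1))).foldl
          (fun d i => (PySem.Dict.keys d).foldl
            (fun d j => if i == j then d.modify j 0 (fun v => v - 1) else d.modify j 0 (fun v => v + 1)) d)
          (PySem.Dict.mk dict)))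
    = (PySem.Dict.keys (PySem.Dict.mk dict)).foldl
        (fun acc j => acc.modify j 0 (fun v => v + ((meal.length : Int) - 1)
          - 2 * ((PySem.List.slice meal (some 0) (some (-1))).foldl
              (fun d s => d.insert s (d.getD s 0 + 1)) (PySem.Dict.empty : PySem.Dict String Int)).getD j 0
          - ((last.toList.map (fun c => String.ofList [c])).foldl
              (fun d c => d.insert c (d.getD c 0 + 1)) (PySem.Dict.empty : PySem.Dict String Int)).getD j 0))
        (PySem.Dict.mk dict) := by
  set P := PySem.List.slice meal (some 0) (some (-1)) with hP
  set LC := last.toList.map (fun c => String.ofList [c]) with hLC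
  set d0 : PySem.Dict String Int := PySem.Dict.mk dict with hd0
  have hK : PySem.Dict.keys d0 = dict.map Prod.fst := by
    simp [hd0, PySem.Dict.keys_mk]
  have hnd0 : (PySem.Dict.keys d0).Nodup := by rw [hK]; exact hnd
  have hPlen : (P.length : Int) = (meal.length : Int) - 1 := by
    rcases meal with _ | ⟨a, t⟩
    · exact absurd rfl hm
    · simp [hP, PySem.List.slice]
  obtain ⟨hAk1, hAv1⟩ := pv_outerA P d0 hnd0
  obtain ⟨hAk2, hAv2⟩ := pv_outerL LC _ (hAk1 ▸ hnd0)
  -- right-hand side values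
  have hprefix : ∀ j, ((P.foldl (fun d s => d.insert s (d.getD s 0 + 1)) (PySem.Dict.empty : PySem.Dict String Int))).getD j 0 = (P.count j : Int) := by
    intro j
    rw [PySem.Dict.getD_foldl_insert_add_one]
    simp
  have hlastc : ∀ j, ((LC.foldl (fun d c => d.insert c (d.getD c 0 + 1)) (PySem.Dict.empty : PySem.Dict String Int))).getD j 0 = (LC.count j : Int) := by
    intro j
    rw [PySem.Dict.getD_foldl_insert_add_one]
    simp
  have hBk : (PySem.Dict.keys ((PySem.Dict.keys d0).foldl
      (fun acc j => acc.modify j 0 (fun v => v + ((meal.length : Int) - 1)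
        - 2 * ((P.foldl (fun d s => d.insert s (d.getD s 0 + 1)) (PySem.Dict.empty : PySem.Dict String Int))).getD j 0
        - ((LC.foldl (fun d c => d.insert c (d.getD c 0 + 1)) (PySem.Dict.empty : PySem.Dict String Int))).getD j 0)) d0))
      = d0.keys :=
    pv_keys_foldl_pres _ _ (fun d j hj => pv_keys_modify_mem d j _ hj) d0 (fun j hj => hj)
  apply PySem.Dict.ext
  rw [PySem.Dict.items_eq_map_keys _ (by rw [hAk2, hAk1]; exact hnd0) 0,
      PySem.Dict.items_eq_map_keys _ (by rw [hBk]; exact hnd0) 0]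
  rw [hAk2, hAk1, hBk]
  apply List.map_congr_left
  intro k hk
  have hv2 := hAv2 k (hAk1 ▸ hk)
  have hv1 := hAv1 k hk
  rw [hv2, hv1]
  rw [pv_getD_foldl_modify_fun _ _ hnd0, if_pos hk, hprefix, hlastc, hPlen]

-- ===== VERDICT (by name: the statement is the Claim_ definition above) =====
theorem nfruits_spec : Claim_equal_nfruits := by
  intro dict meal _ hpre
  obtain ⟨hm, hd, hnd⟩ := hpre
  obtain ⟨last, hlast⟩ : ∃ l, PySem.List.pyGet? meal (-1) = some l := by
    rcases meal with _ | ⟨a, t⟩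
    · exact absurd rfl hm
    · simp [PySem.List.pyGet?, PySem.List.pyIdx?]
  unfold Spec_nfruits nfruits nfruits_alt
  simp only [hlast]
  rw [pv_dicts_eq dict meal last hlast hm hnd]
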